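-- pv_equiv track=rewrite | github.com/sangambartaula/alumni-networking-tool | exa_groq.py | _chunk_section_lines
-- ===== SOURCE A (Python) =====
-- def _chunk_section_lines(lines: list[str]) -> list[list[str]]:
--     chunks = []
--     current = []
--     for line in lines:
--         if line.startswith("###"):
--             if current:
--                 chunks.append(current)
--             current = [line[3:].strip()]
--             continue
--         if current:
--             current.append(line)
--     if current:
--         chunks.append(current)
--     if not chunks and lines:
--         chunks.append(lines[:])
--     return chunks
-- ===== SOURCE B (Python) =====
-- def _chunk_section_lines(lines: list[str]) -> list[list[str]]:
--     # Two-phase: build an index table of '###' headers, then slice out each chunk.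
--     heads = [(i, line) for i, line in enumerate(lines) if line.startswith("###")]
--     if not heads:
--         return [lines[:]] if lines else []
--     ends = [i for i, _ in heads[1:]] + [len(lines)]
--     return [[line[3:].strip()] + lines[i + 1:j] for (i, line), j in zip(heads, ends)]
-- ===== Notes on version B (the rewrite author's own statement) =====
-- stated objective: alternative
-- what changed: Replaces A's single stateful accumulating pass (mutable current chunk flushed into chunks plus a post-loop flush) with a two-phase index-table shape: first collect the (index, line) pairs of '###' headers, then build each chunk by slicing lines between consecutive header indices.
import Mathlib
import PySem

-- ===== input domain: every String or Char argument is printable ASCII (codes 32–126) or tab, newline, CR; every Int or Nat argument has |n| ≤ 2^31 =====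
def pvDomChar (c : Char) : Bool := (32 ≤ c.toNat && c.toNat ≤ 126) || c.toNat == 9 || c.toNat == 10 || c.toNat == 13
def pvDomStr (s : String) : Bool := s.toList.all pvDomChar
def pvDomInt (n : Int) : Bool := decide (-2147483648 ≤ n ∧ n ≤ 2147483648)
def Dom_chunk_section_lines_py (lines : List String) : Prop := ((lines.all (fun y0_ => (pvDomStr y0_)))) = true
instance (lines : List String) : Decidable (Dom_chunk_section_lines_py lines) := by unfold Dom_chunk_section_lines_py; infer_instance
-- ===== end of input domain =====

-- B replaces A's single stateful accumulating pass by a two-phase index-table shape: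
-- collect the positions of the '###' headers, then slice one chunk per header (alternative decomposition, same cost).

-- line[3:].strip(), shared literally by both Pythons
def pvPayload (line : String) : String :=
  PySem.Str.strip (PySem.Str.slice line (some 3) none)

-- ===== PORT A =====
def pvStepA (st : List (List String) × List String) (line : String) :
    List (List String) × List String :=
  if PySem.Str.startswith line "###" then
    (if st.2 = [] then st.1 else st.1 ++ [st.2], [pvPayload line])
  else if st.2 = [] then st else (st.1, st.2 ++ [line])

def chunk_section_lines_py (lines : List String) : List (List String) :=
  let st := lines.foldl pvStepA ([], [])
  let chunks := if st.2 = [] then st.1 else st.1 ++ [st.2]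
  if chunks = [] ∧ lines ≠ [] then [lines] else chunks

-- ===== PORT B =====
def chunk_section_lines_py_alt (lines : List String) : List (List String) :=
  -- heads = [(i, line) for i, line in enumerate(lines) if line.startswith("###")]
  let heads := (PySem.List.enumerate lines).filterMap
    (fun p => if PySem.Str.startswith p.2 "###" then some p else none)
  if heads = [] then (if lines = [] then [] else [lines])
  else
    -- ends = [i for i, _ in heads[1:]] + [len(lines)]
    let ends : List Int := (PySem.List.slice heads (some 1) none).map (·.1) ++ [(lines.length : Int)]
    (heads.zip ends).map (fun q =>
      pvPayload q.1.2 :: PySem.List.slice lines (some (q.1.1 + 1)) (some q.2))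

-- ===== PRECONDITION & SPEC =====
def Spec_chunk_section_lines_py (lines : List String) (out : List (List String)) : Prop := out = chunk_section_lines_py_alt lines
instance (lines : List String) (out : List (List String)) : Decidable (Spec_chunk_section_lines_py lines out) := by unfold Spec_chunk_section_lines_py; infer_instance

-- ===== CLAIM (what is proved, stated in full; the proofs are below) =====
def Claim_equal_chunk_section_lines_py : Prop := ∀ (lines : List String), Dom_chunk_section_lines_py lines → Spec_chunk_section_lines_py lines (chunk_section_lines_py lines)

-- ===== LEMMAS AND PROOFS =====

-- foldr-style (cons) characterization of A's pass: .1 = chunks from headers on, .2 = leading non-header lines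
def pvStepR (line : String) (st : List (List String) × List String) :
    List (List String) × List String :=
  if PySem.Str.startswith line "###" then
    ((pvPayload line :: st.2) :: st.1, [])
  else (st.1, line :: st.2)

-- A's behaviour once `current` is nonempty, as a forward recursion
def pvGo (cur : List String) : List String → List (List String)
  | [] => [cur]
  | l :: ls =>
      if PySem.Str.startswith l "###" then cur :: pvGo [pvPayload l] ls
      else pvGo (cur ++ [l]) ls

theorem pvGo_eq_foldrB (ls : List String) : ∀ cur : List String,
    pvGo cur ls =
      (cur ++ (ls.foldr pvStepR ([], [])).2) :: (ls.foldr pvStepR ([], [])).1 := by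
  induction ls with
  | nil => intro cur; simp [pvGo]
  | cons l ls ih =>
      intro cur
      by_cases h : PySem.Chars.startswith l.toList ['#', '#', '#'] = true
      · simp [pvGo, pvStepR, h, ih]
      · simp [pvGo, pvStepR, h, ih (cur ++ [l])]

theorem pvFoldA_nonempty (ls : List String) : ∀ (chunks : List (List String))
    (cur : List String), cur ≠ [] →
    (let st := ls.foldl pvStepA (chunks, cur)
     if st.2 = [] then st.1 else st.1 ++ [st.2]) = chunks ++ pvGo cur ls := by
  induction ls with
  | nil => intro chunks cur h; simp [pvGo, h]
  | cons l ls ih =>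
      intro chunks cur h
      rw [List.foldl_cons]
      by_cases hl : PySem.Chars.startswith l.toList ['#', '#', '#'] = true
      · have hs : pvStepA (chunks, cur) l = (chunks ++ [cur], [pvPayload l]) := by
          simp [pvStepA, hl, h]
        rw [hs, ih (chunks ++ [cur]) [pvPayload l] (by simp)]
        simp [pvGo, hl]
      · have hs : pvStepA (chunks, cur) l = (chunks, cur ++ [l]) := by
          simp [pvStepA, hl, h]
        rw [hs, ih chunks (cur ++ [l]) (by simp)]
        simp [pvGo, hl]

theorem pvFoldA_empty (ls : List String) : ∀ (chunks : List (List String)),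
    (let st := ls.foldl pvStepA (chunks, [])
     if st.2 = [] then st.1 else st.1 ++ [st.2]) =
      chunks ++ (if (ls.foldr pvStepR ([], [])).1 = [] then []
                 else (ls.foldr pvStepR ([], [])).1) := by
  induction ls with
  | nil => intro chunks; simp
  | cons l ls ih =>
      intro chunks
      rw [List.foldl_cons]
      by_cases hl : PySem.Chars.startswith l.toList ['#', '#', '#'] = true
      · have hs : pvStepA (chunks, []) l = (chunks, [pvPayload l]) := by
          simp [pvStepA, hl]
        rw [hs, pvFoldA_nonempty ls chunks [pvPayload l] (by simp), pvGo_eq_foldrB]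
        simp [pvStepR, hl]
      · have hs : pvStepA (chunks, []) l = (chunks, []) := by
          simp [pvStepA, hl]
        rw [hs, ih chunks]
        simp [pvStepR, hl]

-- ----- B side -----

-- the header-index table with an arbitrary enumerate start (B's port uses start 0)
def pvHeadsF (ls : List String) (n : Int) : List (Int × String) :=
  (PySem.List.enumerate ls n).filterMap
    (fun p => if PySem.Str.startswith p.2 "###" then some p else none)

-- the end bound of the first chunk of a header table
def pvEndOf (lines : List String) : List (Int × String) → Int
  | [] => (lines.length : Int)
  | (j, _) :: _ => j

-- recursive reading of B's zip/map comprehension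
def pvBuildRec (lines : List String) : List (Int × String) → List (List String)
  | [] => []
  | (i, l) :: hs =>
      (pvPayload l :: PySem.List.slice lines (some (i + 1)) (some (pvEndOf lines hs)))
        :: pvBuildRec lines hs

theorem pvHeadsF_nil (n : Int) : pvHeadsF [] n = [] := by
  simp [pvHeadsF, PySem.List.enumerate_nil]

theorem pvHeadsF_cons (l : String) (ls : List String) (n : Int) :
    pvHeadsF (l :: ls) n =
      if PySem.Str.startswith l "###" then (n, l) :: pvHeadsF ls (n + 1)
      else pvHeadsF ls (n + 1) := by
  by_cases h : PySem.Chars.startswith l.toList ['#', '#', '#'] = true <;>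
    simp [pvHeadsF, PySem.List.enumerate_cons, h]

-- B's zip/map comprehension equals the recursive reading
theorem pvZip_eq_buildRec (lines : List String) : ∀ hs : List (Int × String),
    (hs.zip ((PySem.List.slice hs (some 1) none).map (·.1) ++ [(lines.length : Int)])).map
        (fun q => pvPayload q.1.2 ::
          PySem.List.slice lines (some (q.1.1 + 1)) (some q.2)) =
      pvBuildRec lines hs := by
  intro hs
  induction hs with
  | nil => simp [pvBuildRec]
  | cons p hs ih =>
      obtain ⟨i, l⟩ := p
      rw [PySem.List.slice_from_one] at ih ⊢
      cases hs with
      | nil => simp [pvBuildRec, pvEndOf]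
      | cons q hs' =>
          obtain ⟨j, m⟩ := q
          simp only [List.tail_cons, List.map_cons] at ih ⊢
          simp [pvBuildRec, pvEndOf, ih]

theorem pv_take_takeWhile {α : Type} (p : α → Bool) : ∀ ls : List α,
    ls.take (ls.takeWhile p).length = ls.takeWhile p := by
  intro ls
  induction ls with
  | nil => simp
  | cons l ls ih =>
      by_cases h : p l = true <;> simp [h, ih]

theorem pvFoldr_snd (ls : List String) :
    (ls.foldr pvStepR ([], [])).2 =
      ls.takeWhile (fun l => !PySem.Str.startswith l "###") := by
  induction ls with
  | nil => simp
  | cons l ls ih =>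
      by_cases h : PySem.Chars.startswith l.toList ['#', '#', '#'] = true <;>
        simp [pvStepR, h, ih]

-- the first end bound is the offset plus the length of the leading non-header run
theorem pvEndOf_headsF (lines : List String) : ∀ (ls : List String) (k : ℕ),
    lines.drop k = ls → k ≤ lines.length →
    pvEndOf lines (pvHeadsF ls (k : Int)) =
      ((k + (ls.takeWhile (fun l => !PySem.Str.startswith l "###")).length : ℕ) : Int) := by
  intro ls
  induction ls with
  | nil =>
      intro k hdrop hk
      have : lines.length - k = 0 := by
        have := congrArg List.length hdrop; simpa using this
      have hlen : lines.length = k := by omega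
      simp [pvHeadsF_nil, pvEndOf, hlen]
  | cons l ls ih =>
      intro k hdrop hk
      have hdrop' : lines.drop (k + 1) = ls := by
        rw [← List.drop_drop, hdrop]; simp
      have hk' : k + 1 ≤ lines.length := by
        by_contra h
        have : lines.drop k = [] := List.drop_eq_nil_of_le (by omega)
        rw [hdrop] at this; exact List.cons_ne_nil _ _ this
      rw [pvHeadsF_cons]
      by_cases h : PySem.Chars.startswith l.toList ['#', '#', '#'] = true
      · simp [h, pvEndOf]
      · have hih := ih (k + 1) hdrop' hk'
        push_cast at hih ⊢
        simp [h, hih]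
        omega

-- the first slice of a chunk is exactly the run of non-header lines after the header
theorem pvSlice_eq_snd (lines : List String) (ls : List String) (k : ℕ)
    (hdrop : lines.drop k = ls) (hk : k ≤ lines.length) :
    PySem.List.slice lines (some (k : Int)) (some (pvEndOf lines (pvHeadsF ls (k : Int)))) =
      (ls.foldr pvStepR ([], [])).2 := by
  rw [pvEndOf_headsF lines ls k hdrop hk, PySem.List.slice_natCast, hdrop, pvFoldr_snd]
  have : k + (ls.takeWhile (fun l => !PySem.Str.startswith l "###")).length - k
      = (ls.takeWhile (fun l => !PySem.Str.startswith l "###")).length := by omega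
  rw [this, pv_take_takeWhile]

-- the recursive reading over the header table equals A's foldr characterization
theorem pvBuild_eq_foldr (lines : List String) : ∀ (ls : List String) (k : ℕ),
    lines.drop k = ls → k ≤ lines.length →
    pvBuildRec lines (pvHeadsF ls (k : Int)) = (ls.foldr pvStepR ([], [])).1 := by
  intro ls
  induction ls with
  | nil => intro k _ _; simp [pvHeadsF_nil, pvBuildRec]
  | cons l ls ih =>
      intro k hdrop hk
      have hdrop' : lines.drop (k + 1) = ls := by
        rw [← List.drop_drop, hdrop]; simp
      have hk' : k + 1 ≤ lines.length := by
        by_contra h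
        have : lines.drop k = [] := List.drop_eq_nil_of_le (by omega)
        rw [hdrop] at this; exact List.cons_ne_nil _ _ this
      rw [pvHeadsF_cons]
      have hcast : (k : Int) + 1 = ((k + 1 : ℕ) : Int) := by push_cast; ring
      by_cases h : PySem.Chars.startswith l.toList ['#', '#', '#'] = true
      · rw [if_pos (show PySem.Str.startswith l "###" = true by simp [h])]
        simp only [pvBuildRec, hcast]
        rw [pvSlice_eq_snd lines ls (k + 1) hdrop' hk',
            ih (k + 1) hdrop' hk']
        simp [pvStepR, h]
      · rw [if_neg (show ¬ PySem.Str.startswith l "###" = true by simp [h])]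
        simp only [hcast]
        rw [ih (k + 1) hdrop' hk']
        simp [pvStepR, h]

-- the header table is empty iff A's pass finds no chunk
theorem pvHeadsF_nil_iff : ∀ (ls : List String) (n : Int),
    (pvHeadsF ls n = [] ↔ (ls.foldr pvStepR ([], [])).1 = []) := by
  intro ls
  induction ls with
  | nil => intro n; simp [pvHeadsF_nil]
  | cons l ls ih =>
      intro n
      rw [pvHeadsF_cons]
      by_cases h : PySem.Chars.startswith l.toList ['#', '#', '#'] = true <;>
        simp [pvStepR, h, ih (n + 1)]

-- ===== VERDICT (by name: the statement is the Claim_ definition above) =====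
theorem chunk_section_lines_py_spec : Claim_equal_chunk_section_lines_py := by
  intro lines _
  unfold Spec_chunk_section_lines_py chunk_section_lines_py chunk_section_lines_py_alt
  have hA := pvFoldA_empty lines []
  simp only [List.nil_append] at hA
  have hheads :
      (PySem.List.enumerate lines).filterMap
          (fun p => if PySem.Str.startswith p.2 "###" then some p else none)
        = pvHeadsF lines (0 : Int) := rfl
  have hbuild : pvBuildRec lines (pvHeadsF lines (0 : Int)) = (lines.foldr pvStepR ([], [])).1 := by
    have := pvBuild_eq_foldr lines lines 0 (by simp) (by omega)
    simpa using this
  simp only [hA, hheads, pvZip_eq_buildRec]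
  by_cases hch : (lines.foldr pvStepR ([], [])).1 = []
  · have hnil : pvHeadsF lines (0 : Int) = [] := (pvHeadsF_nil_iff lines 0).2 hch
    rw [hch, hnil]
    by_cases hls : lines = [] <;> simp [hls]
  · have hne : pvHeadsF lines (0 : Int) ≠ [] :=
      fun h => hch ((pvHeadsF_nil_iff lines 0).1 h)
    rw [if_neg hch, if_neg hne, hbuild, if_neg (fun hand => hch hand.1)]
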